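-- pv_equiv track=rewrite | github.com/leventkamber/Discord-Bot | homework 1/exercise6.py | contains_digits
-- ===== SOURCE A (Python) =====
-- def contains_digits(number, digits):
--     current = 0
--     counter = 0
--     while number != 0:
--         current = int(number % 10)
--         number = int(number / 10)
--         for digit in digits:
--             if digit == current:
--                 counter += 1
--     if counter == len(digits):
--         return True
--     else:
--         return False
-- ===== SOURCE B (Python) =====
-- def contains_digits(number, digits):
--     # frequency table of extracted digits, then one lookup pass over `digits`
--     freq = {}
--     while number != 0:
--         d = number % 10
--         number = int(number / 10)
--         freq[d] = freq.get(d, 0) + 1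
--     return sum(freq.get(x, 0) for x in digits) == len(digits)
-- ===== Notes on version B (the rewrite author's own statement) =====
-- stated objective: idiomatic
-- what changed: B replaces A's inner scan of `digits` on every extracted digit with a frequency dict built once during extraction, followed by a single lookup-and-sum pass over `digits`.
import Mathlib
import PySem

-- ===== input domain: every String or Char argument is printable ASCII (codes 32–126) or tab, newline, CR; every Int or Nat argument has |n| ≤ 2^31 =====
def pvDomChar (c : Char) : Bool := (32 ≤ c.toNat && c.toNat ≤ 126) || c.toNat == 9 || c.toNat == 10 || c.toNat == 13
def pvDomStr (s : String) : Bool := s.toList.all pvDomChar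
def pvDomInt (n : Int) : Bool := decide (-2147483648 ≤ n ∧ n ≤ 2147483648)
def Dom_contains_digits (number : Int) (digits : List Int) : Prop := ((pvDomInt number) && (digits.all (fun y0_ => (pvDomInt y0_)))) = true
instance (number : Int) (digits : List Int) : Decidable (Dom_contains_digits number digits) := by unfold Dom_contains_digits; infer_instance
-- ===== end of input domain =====

-- B builds a frequency table of the extracted digits and sums lookups over `digits`
-- instead of rescanning `digits` for every extracted digit (idiomatic Counter style).


-- termination helper for both extraction loops: trunc-division by 10 shrinks |n|
theorem pvTdiv10_natAbs_lt (n : Int) (h : n ≠ 0) : (n.tdiv 10).natAbs < n.natAbs := by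
  have h1 : (n.tdiv 10).natAbs = n.natAbs / 10 := by
    rw [Int.natAbs_tdiv]
    rfl
  omega

-- ===== PORT A =====
-- `int(number / 10)` is exact truncating division (Int.tdiv) on the domain |number| ≤ 2^31
def pvALoop (number : Int) (digits : List Int) (counter : Int) : Int :=
  if h : number = 0 then counter
  else
    let current := PySem.Int.mod number 10
    pvALoop (number.tdiv 10) digits
      (digits.foldl (fun c digit => if digit = current then c + 1 else c) counter)
termination_by number.natAbs
decreasing_by exact pvTdiv10_natAbs_lt number h

def contains_digits (number : Int) (digits : List Int) : Bool :=
  let counter := pvALoop number digits 0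
  if counter = (digits.length : Int) then true else false

-- ===== PORT B =====
def pvBLoop (number : Int) (freq : PySem.Dict Int Int) : PySem.Dict Int Int :=
  if h : number = 0 then freq
  else
    let d := PySem.Int.mod number 10
    pvBLoop (number.tdiv 10) (freq.insert d (freq.getD d 0 + 1))
termination_by number.natAbs
decreasing_by exact pvTdiv10_natAbs_lt number h

def contains_digits_alt (number : Int) (digits : List Int) : Bool :=
  let freq := pvBLoop number PySem.Dict.empty
  decide (digits.foldl (fun s x => s + freq.getD x 0) 0 = (digits.length : Int))

-- ===== PRECONDITION & SPEC =====
def Spec_contains_digits (number : Int) (digits : List Int) (out : Bool) : Prop := out = contains_digits_alt number digits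
instance (number : Int) (digits : List Int) (out : Bool) : Decidable (Spec_contains_digits number digits out) := by unfold Spec_contains_digits; infer_instance

-- ===== CLAIM (what is proved, stated in full; the proofs are below) =====
def Claim_equal_contains_digits : Prop := ∀ (number : Int) (digits : List Int), Dom_contains_digits number digits → Spec_contains_digits number digits (contains_digits number digits)

-- ===== LEMMAS AND PROOFS =====

-- the sequence of digits both loops extract
def pvExtract (number : Int) : List Int :=
  if h : number = 0 then []
  else PySem.Int.mod number 10 :: pvExtract (number.tdiv 10)
termination_by number.natAbs
decreasing_by exact pvTdiv10_natAbs_lt number h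

theorem pvInnerFold (digits : List Int) (current c : Int) :
    digits.foldl (fun c digit => if digit = current then c + 1 else c) c
      = c + digits.count current := by
  induction digits generalizing c with
  | nil => simp
  | cons a t ih =>
      simp only [List.foldl_cons, List.count_cons, ih]
      by_cases h : a = current
      · simp [h]; ring
      · simp [h]

theorem pvALoop_eq (number : Int) (digits : List Int) : ∀ c : Int,
    pvALoop number digits c
      = c + ((pvExtract number).map (fun d => (digits.count d : Int))).sum := by
  induction number using pvExtract.induct with
  | case1 => intro c; rw [pvALoop, pvExtract]; simp
  | case2 n hn ih =>
      intro c
      rw [pvALoop, pvExtract, dif_neg hn, dif_neg hn]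
      simp only [pvInnerFold, ih, List.map_cons, List.sum_cons]
      ring

theorem pvBLoop_eq (number : Int) : ∀ freq : PySem.Dict Int Int,
    pvBLoop number freq
      = (pvExtract number).foldl (fun d x => d.insert x (d.getD x 0 + 1)) freq := by
  induction number using pvExtract.induct with
  | case1 => intro f; rw [pvBLoop, pvExtract]; simp
  | case2 n hn ih =>
      intro f
      rw [pvBLoop, pvExtract, dif_neg hn, dif_neg hn]
      simp only [List.foldl_cons]
      exact ih _

-- double counting: summing digits' counts over the extracted list equals
-- summing extracted counts over digits
theorem pvSumIndicator (M : List Int) (a : Int) :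
    (M.map (fun x => if x = a then (1:Int) else 0)).sum = M.count a := by
  induction M with
  | nil => simp
  | cons b t ih =>
      simp only [List.map_cons, List.sum_cons, List.count_cons, ih]
      by_cases h : b = a
      · subst h; simp; ring
      · simp [h]

theorem pvSwapCount (L M : List Int) :
    (L.map (fun d => (M.count d : Int))).sum
      = (M.map (fun x => (L.count x : Int))).sum := by
  induction L with
  | nil => simp
  | cons a L ih =>
      simp only [List.map_cons, List.sum_cons, ih]
      have hcnt : ∀ x : Int, (((a :: L).count x : Int))
          = (L.count x : Int) + (if x = a then (1:Int) else 0) := by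
        intro x
        by_cases h : x = a
        · simp [h]
        · simp [h, Ne.symm h]
      calc ((M.count a : Int)) + (M.map (fun x => (L.count x : Int))).sum
          = (M.map (fun x => (L.count x : Int))).sum
              + (M.map (fun x => if x = a then (1:Int) else 0)).sum := by
            rw [pvSumIndicator]; ring
        _ = (M.map (fun x => ((a :: L).count x : Int))).sum := by
            rw [← List.sum_map_add]
            simp only [hcnt]

theorem pvFoldlSum (M : List Int) (f : Int → Int) : ∀ s : Int,
    M.foldl (fun s x => s + f x) s = s + (M.map f).sum := by
  induction M with
  | nil => intro s; simp
  | cons a t ih => intro s; simp only [List.foldl_cons, List.map_cons, List.sum_cons, ih]; ring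

theorem contains_digits_spec : Claim_equal_contains_digits := by
  intro number digits _
  unfold Spec_contains_digits contains_digits contains_digits_alt
  rw [pvALoop_eq, pvBLoop_eq, PySem.Dict.foldl_insert_getD_add_one_eq_counter]
  have hsum : ((pvExtract number).map (fun d => (digits.count d : Int))).sum
      = digits.foldl (fun s x => s + ((PySem.Dict.counter (pvExtract number)).getD x 0)) 0 := by
    rw [pvSwapCount, pvFoldlSum, zero_add]
    simp [PySem.Dict.getD_counter]
  rw [zero_add, hsum]
  by_cases h : digits.foldl (fun s x => s + ((PySem.Dict.counter (pvExtract number)).getD x 0)) 0 = (digits.length : Int) <;> simp [h]
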